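-- pv_equiv track=rewrite | github.com/QFrankQ/Dungeon-Master | src/context/dm_context_builder.py | _format_cached_rules
-- ===== SOURCE A (Python) =====
-- from typing import List, Optional, Dict, Any, Union
--
-- def _format_cached_rules(rules_cache: Dict[str, Any]) -> str:
--     """
--     Format cached rules for DM context.
--
--     Provides quick reference to rules already queried during this turn,
--     helping DM make informed decisions without additional lookups.
--
--     Args:
--         rules_cache: Dictionary of cached rule entries
--
--     Returns:
--         Formatted rules cache string
--     """
--     if not rules_cache:
--         return ""
--
--     lines = []
--     lines.append("Cached Rules Reference:")
--
--     # Group by entry_type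
--     rules_by_type = {}
--     for rule_name, rule_data in rules_cache.items():
--         entry_type = rule_data.get("entry_type", "unknown")
--         if entry_type not in rules_by_type:
--             rules_by_type[entry_type] = []
--         rules_by_type[entry_type].append(rule_data)
--
--     # Format each type
--     for entry_type, rules in sorted(rules_by_type.items()):
--         lines.append(f"\n  {entry_type.upper()}S:")
--         for rule in rules:
--             name = rule.get("name", "Unknown")
--             summary = rule.get("summary", rule.get("description", "")[:100])
--             lines.append(f"    - {name}: {summary}")
--
--     return "\n".join(lines)
-- ===== SOURCE B (Python) =====
-- def _format_cached_rules(rules_cache):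
--     """Format cached rules grouped by entry type (sorted ordered-dedup of
--     types + a per-type filter pass, instead of A's grouping dict)."""
--     if not rules_cache:
--         return ""
--     entries = list(rules_cache.values())
--     types = [e.get("entry_type", "unknown") for e in entries]
--     lines = ["Cached Rules Reference:"]
--     for t in sorted(dict.fromkeys(types)):
--         lines.append(f"\n  {t.upper()}S:")
--         lines.extend(
--             f"    - {e.get('name', 'Unknown')}: "
--             f"{e.get('summary', e.get('description', '')[:100])}"
--             for e, et in zip(entries, types) if et == t
--         )
--     return "\n".join(lines)
-- ===== Notes on version B (the rewrite author's own statement) =====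
-- stated objective: simpler
-- what changed: Replaces A's grouping-dict-then-sorted-items structure with a direct pass: ordered dedup of the entry types, sort it, and emit each type's block by filtering the cached entries, with the per-rule lines produced inline instead of a dict of grouped lists.
import Mathlib
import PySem

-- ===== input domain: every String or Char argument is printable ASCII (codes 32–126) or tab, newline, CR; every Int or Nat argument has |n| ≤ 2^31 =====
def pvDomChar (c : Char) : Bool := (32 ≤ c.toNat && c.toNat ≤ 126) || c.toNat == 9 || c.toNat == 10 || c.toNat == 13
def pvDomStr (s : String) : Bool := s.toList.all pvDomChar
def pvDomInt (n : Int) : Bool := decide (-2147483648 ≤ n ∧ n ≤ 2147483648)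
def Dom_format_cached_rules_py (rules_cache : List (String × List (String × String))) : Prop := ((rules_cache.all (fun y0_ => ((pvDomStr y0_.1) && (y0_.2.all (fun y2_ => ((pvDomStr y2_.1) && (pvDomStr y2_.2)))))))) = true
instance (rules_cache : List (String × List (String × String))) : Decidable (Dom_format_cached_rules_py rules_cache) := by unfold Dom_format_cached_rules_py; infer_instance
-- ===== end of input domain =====

-- B replaces A's grouping dict + sorted items with sorted ordered-dedup of the entry types and a
-- per-type filter pass over the entries; the two produce the identical string (proved below).

-- shared leaf helpers: both Pythons read the same fields of a rule dict the same way
-- rule.get(k, dflt) on the rule dict (first match = Python dict lookup under the assoc-list convention)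
def pvRuleGetD (rule : List (String × String)) (k dflt : String) : String :=
  (PySem.Dict.mk rule).getD k dflt

-- rule_data.get("entry_type", "unknown")
def pvEtype (rule : List (String × String)) : String := pvRuleGetD rule "entry_type" "unknown"

-- summary = rule.get("summary", rule.get("description", "")[:100])  (default used only if "summary" missing)
def pvSummary (rule : List (String × String)) : String :=
  match (PySem.Dict.mk rule).get? "summary" with
  | some s => s
  | none   => PySem.Str.slice (pvRuleGetD rule "description" "") none (some 100)

-- f"    - {name}: {summary}"
def pvRuleLine (rule : List (String × String)) : String :=
  "    - " ++ pvRuleGetD rule "name" "Unknown" ++ ": " ++ pvSummary rule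

-- f"\n  {entry_type.upper()}S:"
def pvHeader (t : String) : String := "\n  " ++ PySem.Str.upper t ++ "S:"

-- ===== PORT A =====
def format_cached_rules_py (rules_cache : List (String × List (String × String))) : String :=
  if rules_cache = [] then ""
  else
    let lines : List String := ["Cached Rules Reference:"]
    -- group by entry_type: 'if entry_type not in d: d[et] = []; d[et].append(rule_data)' is modify et [] (· ++ [rule_data])
    let rules_by_type : PySem.Dict String (List (List (String × String))) :=
      rules_cache.foldl (fun d r => d.modify (pvEtype r.2) [] (fun cur => cur ++ [r.2])) PySem.Dict.empty
    -- sorted(d.items()): keys are distinct, so Python's tuple comparison only ever compares the keys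
    let lines :=
      (PySem.List.sorted rules_by_type.items (fun p => p.1)).foldl
        (fun lines p =>
          p.2.foldl (fun lines rule => lines ++ [pvRuleLine rule]) (lines ++ [pvHeader p.1]))
        lines
    PySem.Str.join "\n" lines

-- ===== PORT B =====
def format_cached_rules_py_alt (rules_cache : List (String × List (String × String))) : String :=
  if rules_cache = [] then ""
  else
    let entries := rules_cache.map (fun r => r.2)
    let types := entries.map pvEtype
    PySem.Str.join "\n"
      ("Cached Rules Reference:" ::
        (PySem.List.sorted (PySem.List.dedup types) (fun t => t)).flatMap
          (fun t => pvHeader t :: (entries.filter (fun e => pvEtype e == t)).map pvRuleLine))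

-- ===== PRECONDITION & SPEC =====
def Spec_format_cached_rules_py (rules_cache : List (String × List (String × String))) (out : String) : Prop := out = format_cached_rules_py_alt rules_cache
instance (rules_cache : List (String × List (String × String))) (out : String) : Decidable (Spec_format_cached_rules_py rules_cache out) := by unfold Spec_format_cached_rules_py; infer_instance

-- ===== CLAIM (what is proved, stated in full; the proofs are below) =====
def Claim_equal_format_cached_rules_py : Prop := ∀ (rules_cache : List (String × List (String × String))), Dom_format_cached_rules_py rules_cache → Spec_format_cached_rules_py rules_cache (format_cached_rules_py rules_cache)

-- ===== LEMMAS AND PROOFS =====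

-- A's grouping dict, characterised: its keys are the ordered dedup of the types, its value at t is
-- the list of entries of type t.
theorem pvDict_keys (rules_cache : List (String × List (String × String))) :
    (rules_cache.foldl (fun d r => d.modify (pvEtype r.2) [] (fun cur => cur ++ [r.2]))
        (PySem.Dict.empty : PySem.Dict String (List (List (String × String))))).keys
      = PySem.List.dedup (rules_cache.map (fun r => pvEtype r.2)) := by
  rw [PySem.Dict.keys_foldl_modify_key rules_cache (fun r => pvEtype r.2) []
      (fun _ r => fun cur => cur ++ [r.2])]
  simp [PySem.Dict.keys_empty, PySem.Set.update_nil_left]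

theorem pvDict_nodup (rules_cache : List (String × List (String × String))) :
    (rules_cache.foldl (fun d r => d.modify (pvEtype r.2) [] (fun cur => cur ++ [r.2]))
        (PySem.Dict.empty : PySem.Dict String (List (List (String × String))))).keys.Nodup := by
  exact PySem.Dict.nodup_keys_foldl_modify_key rules_cache (fun r => pvEtype r.2) []
      (fun _ r => fun cur => cur ++ [r.2]) _ (by simp [PySem.Dict.keys_empty])

theorem pvDict_getD (rules_cache : List (String × List (String × String))) (t : String) :
    (rules_cache.foldl (fun d r => d.modify (pvEtype r.2) [] (fun cur => cur ++ [r.2]))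
        (PySem.Dict.empty : PySem.Dict String (List (List (String × String))))).getD t []
      = ((rules_cache.map (fun r => r.2)).filter (fun e => pvEtype e == t)) := by
  have h : rules_cache.foldl (fun d r => d.modify (pvEtype r.2) [] (fun cur => cur ++ [r.2]))
        (PySem.Dict.empty : PySem.Dict String (List (List (String × String))))
      = (rules_cache.map (fun r => (pvEtype r.2, r.2))).foldl
          (fun d p => d.modify p.1 [] (fun cur => cur ++ [p.2])) PySem.Dict.empty := by
    rw [List.foldl_map]
  rw [h, PySem.Dict.getD_foldl_modify_append, PySem.Dict.getD_empty]
  simp [List.filter_map, Function.comp_def]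

-- sorting the (key, value) items of a nodup-keyed map by key = mapping over the sorted keys
theorem pvSorted_map_fst {β : Type} (ks : List String) (v : String → β) (h : ks.Nodup) :
    PySem.List.sorted (ks.map (fun k => (k, v k))) (fun p => p.1)
      = (PySem.List.sorted ks (fun k => k)).map (fun k => (k, v k)) := by
  apply PySem.List.sorted_eq_of_perm_of_pairwise_lt
  · exact (PySem.List.sorted_perm ks (fun k => k) false).map _
  · rw [List.pairwise_map]
    have h1 := PySem.List.sorted_pairwise ks (fun k => k)
    have h2 : (PySem.List.sorted ks (fun k => k)).Nodup :=
      ((PySem.List.sorted_perm ks (fun k => k) false).nodup_iff).mpr h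
    exact (h1.and h2).imp (fun hab => lt_of_le_of_ne hab.1 hab.2)

theorem format_cached_rules_py_eq (rules_cache : List (String × List (String × String))) :
    format_cached_rules_py rules_cache = format_cached_rules_py_alt rules_cache := by
  unfold format_cached_rules_py format_cached_rules_py_alt
  by_cases hrc : rules_cache = []
  · simp [hrc]
  · simp only [if_neg hrc]
    rw [PySem.Dict.items_eq_map_keys _ (pvDict_nodup rules_cache) []]
    rw [pvSorted_map_fst _ _ (by rw [pvDict_keys]; exact PySem.Set.nodup_ofList _)]
    simp only [PySem.List.foldl_append_singleton_eq_map, List.append_assoc,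
      List.singleton_append, List.foldl_map]
    rw [show (fun (lines : List String) (k : String) =>
          lines ++ (pvHeader k ::
            ((rules_cache.foldl (fun d r => d.modify (pvEtype r.2) [] (fun cur => cur ++ [r.2]))
                PySem.Dict.empty).getD k []).map pvRuleLine))
        = fun lines k => lines ++ (fun k => pvHeader k ::
            ((rules_cache.foldl (fun d r => d.modify (pvEtype r.2) [] (fun cur => cur ++ [r.2]))
                PySem.Dict.empty).getD k []).map pvRuleLine) k from rfl]
    rw [PySem.List.foldl_append_eq_flatMap, pvDict_keys, List.singleton_append]
    simp only [List.map_map, Function.comp_def]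
    congr 1
    have hfun : (fun k => pvHeader k ::
          List.map pvRuleLine
            ((List.foldl (fun d r => d.modify (pvEtype r.2) [] fun cur => cur ++ [r.2])
                PySem.Dict.empty rules_cache).getD k []))
        = (fun t => pvHeader t ::
            List.map pvRuleLine
              (List.filter (fun e => pvEtype e == t) (List.map (fun r => r.2) rules_cache))) := by
      funext t
      rw [pvDict_getD]
    rw [hfun]

-- ===== VERDICT (by name: the statement is the Claim_ definition above) =====
theorem format_cached_rules_py_spec : Claim_equal_format_cached_rules_py := by
  intro rules_cache _
  exact format_cached_rules_py_eq rules_cache
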